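-- pv_equiv track=rewrite | github.com/dtadpole/kernel_lab | cuda_exec/scripts/ncu_report.py | _deduplicate_device_metrics
-- ===== SOURCE A (Python) =====
-- def _deduplicate_device_metrics(raw: str) -> str:
--     """Keep only the first invocation block's device__ lines.
--
--     The raw-page output repeats every metric for each kernel invocation.
--     ``device__`` metrics are GPU hardware constants — identical across all
--     invocations.  We keep them in the first block and strip them from all
--     subsequent blocks.
--     """
--     lines = raw.split("\n")
--     out: list[str] = []
--     block_index = -1  # incremented to 0 at first "Metric Name" header
--
--     for line in lines:
--         stripped = line.lstrip()
--
--         # Detect invocation block boundary: "Metric Name" header line.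
--         if stripped.startswith("Metric Name"):
--             block_index += 1
--             out.append(line)
--             continue
--
--         # After the first block, skip device__ lines.
--         if block_index > 0 and stripped.startswith("device__"):
--             continue
--
--         out.append(line)
--
--     return "\n".join(out)
-- ===== SOURCE B (Python) =====
-- def _deduplicate_device_metrics(raw: str) -> str:
--     """Partition the lines at the second "Metric Name" header: everything
--     before it is kept verbatim, everything from it on is filtered of
--     device__ metric lines."""
--     lines = raw.split("\n")
--     headers = [i for i, line in enumerate(lines)
--                if line.lstrip().startswith("Metric Name")]
--     if len(headers) < 2:
--         keep = lines
--     else: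
--         cut = headers[1]
--         keep = lines[:cut] + [l for l in lines[cut:]
--                               if not l.lstrip().startswith("device__")]
--     return "\n".join(keep)
-- ===== Notes on version B (the rewrite author's own statement) =====
-- stated objective: alternative
-- what changed: Replaced A's single stateful scan with a mutable block counter by a partition-based pipeline: collect the positions of the 'Metric Name' header lines, cut the line list at the second header, keep the prefix verbatim and filter device__ lines out of the suffix.
import Mathlib
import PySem

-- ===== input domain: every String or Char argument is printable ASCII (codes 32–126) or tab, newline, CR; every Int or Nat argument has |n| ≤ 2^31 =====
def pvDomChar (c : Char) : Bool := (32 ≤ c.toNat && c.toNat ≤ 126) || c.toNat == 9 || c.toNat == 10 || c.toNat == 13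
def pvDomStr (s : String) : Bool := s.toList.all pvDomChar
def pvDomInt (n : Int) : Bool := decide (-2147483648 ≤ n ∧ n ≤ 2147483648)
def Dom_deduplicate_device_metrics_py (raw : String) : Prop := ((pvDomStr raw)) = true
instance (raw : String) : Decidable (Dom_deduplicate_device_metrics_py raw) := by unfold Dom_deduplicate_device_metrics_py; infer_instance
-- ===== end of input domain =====

-- B restructures A's stateful scan as: collect header positions, cut at the second header,
-- keep the prefix verbatim and filter device__ lines from the suffix (same return value, 'alternative').

-- ===== PORT A =====
-- raw.split("\n"): split? is `none` only for sep = "", so .getD [] is exact here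
def deduplicate_device_metrics_py (raw : String) : String :=
  PySem.Str.join "\n"
    (((PySem.Str.split? raw "\n").getD []).foldl
      (fun (st : List String × Int) (line : String) =>
        if PySem.Str.startswith (PySem.Str.lstrip line) "Metric Name" then (st.1 ++ [line], st.2 + 1)
        else if st.2 > 0 && PySem.Str.startswith (PySem.Str.lstrip line) "device__" then st
        else (st.1 ++ [line], st.2)) ([], -1)).1

-- ===== PORT B =====
-- raw.split("\n") as above; headers[1] via [1]! (guarded by the length test, as in Source B)
def deduplicate_device_metrics_py_alt (raw : String) : String :=
  let lines := (PySem.Str.split? raw "\n").getD []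
  let headers := ((PySem.List.enumerate lines 0).filter
      (fun p => PySem.Str.startswith (PySem.Str.lstrip p.2) "Metric Name")).map (·.1)
  let keep :=
    if headers.length < 2 then lines
    else
      PySem.List.slice lines none (some headers[1]!) ++
        (PySem.List.slice lines (some headers[1]!) none).filter
          (fun l => !(PySem.Str.startswith (PySem.Str.lstrip l) "device__"))
  PySem.Str.join "\n" keep

-- ===== PRECONDITION & SPEC =====
def Spec_deduplicate_device_metrics_py (raw : String) (out : String) : Prop := out = deduplicate_device_metrics_py_alt raw
instance (raw : String) (out : String) : Decidable (Spec_deduplicate_device_metrics_py raw out) := by unfold Spec_deduplicate_device_metrics_py; infer_instance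

-- ===== CLAIM (what is proved, stated in full; the proofs are below) =====
def Claim_equal_deduplicate_device_metrics_py : Prop := ∀ (raw : String), Dom_deduplicate_device_metrics_py raw → Spec_deduplicate_device_metrics_py raw (deduplicate_device_metrics_py raw)

-- ===== LEMMAS AND PROOFS =====

def pvHdr (l : String) : Bool := PySem.Str.startswith (PySem.Str.lstrip l) "Metric Name"
def pvDev (l : String) : Bool := PySem.Str.startswith (PySem.Str.lstrip l) "device__"
def pvKeep (l : String) : Bool := !pvDev l

-- recursive form of A's scan (first component of the fold state)
def pvProcA (bi : Int) : List String → List String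
  | [] => []
  | l :: ls =>
    if pvHdr l then l :: pvProcA (bi + 1) ls
    else if bi > 0 && pvDev l then pvProcA bi ls
    else l :: pvProcA bi ls

-- header positions, counting from i
def pvIdxs (i : Int) (ls : List String) : List Int :=
  ((PySem.List.enumerate ls i).filter (fun p => pvHdr p.2)).map (·.1)

theorem pvIdxs_nil (i : Int) : pvIdxs i [] = [] := by
  simp [pvIdxs, PySem.List.enumerate_nil]

theorem pvIdxs_cons (i : Int) (l : String) (ls : List String) :
    pvIdxs i (l :: ls) = if pvHdr l then i :: pvIdxs (i+1) ls else pvIdxs (i+1) ls := by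
  simp only [pvIdxs, PySem.List.enumerate_cons, List.filter_cons]
  split <;> simp

theorem pvIdxs_ge (i : Int) (ls : List String) : ∀ c ∈ pvIdxs i ls, i ≤ c := by
  induction ls generalizing i with
  | nil => simp [pvIdxs_nil]
  | cons l ls ih =>
    intro c hc
    rw [pvIdxs_cons] at hc
    split at hc
    · rcases List.mem_cons.1 hc with h | h
      · omega
      · have := ih (i+1) c h; omega
    · have := ih (i+1) c hc; omega

theorem pvHdr_not_dev (l : String) (h : pvHdr l = true) : pvDev l = false := by
  unfold pvHdr at h
  unfold pvDev
  simp only [PySem.Str.startswith_eq] at *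
  rw [Bool.eq_false_iff]
  intro hd
  rw [PySem.Chars.startswith_iff] at h hd
  have hle : ("device__".toList).length ≤ ("Metric Name".toList).length := by decide
  have := List.prefix_of_prefix_length_le hd h hle
  exact absurd this (by decide)

theorem pvFoldA (ls : List String) (out : List String) (bi : Int) :
    (ls.foldl (fun (st : List String × Int) (line : String) =>
        if PySem.Str.startswith (PySem.Str.lstrip line) "Metric Name" then (st.1 ++ [line], st.2 + 1)
        else if st.2 > 0 && PySem.Str.startswith (PySem.Str.lstrip line) "device__" then st
        else (st.1 ++ [line], st.2)) (out, bi)).1 = out ++ pvProcA bi ls := by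
  induction ls generalizing out bi with
  | nil => simp [pvProcA]
  | cons l ls ih =>
    simp only [List.foldl_cons]
    unfold pvProcA pvHdr pvDev
    by_cases h1 : PySem.Str.startswith (PySem.Str.lstrip l) "Metric Name" = true
    · rw [if_pos h1, if_pos h1, ih]
      simp
    · rw [if_neg h1, if_neg h1]
      by_cases h3 : (decide (bi > 0) && PySem.Str.startswith (PySem.Str.lstrip l) "device__") = true
      · rw [if_pos h3, if_pos h3, ih]
      · rw [if_neg h3, if_neg h3, ih]
        simp

theorem pvProcA_pos (ls : List String) (bi : Int) (h : 0 < bi) :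
    pvProcA bi ls = ls.filter pvKeep := by
  induction ls generalizing bi with
  | nil => rfl
  | cons l ls ih =>
    unfold pvProcA
    by_cases h1 : pvHdr l
    · simp [h1, pvKeep, pvHdr_not_dev l h1, ih (bi+1) (by omega)]
    · by_cases h2 : pvDev l
      · simp [h1, h2, h, pvKeep, ih bi h]
      · simp [h1, h2, pvKeep, ih bi h]

theorem pvProcA_zero (ls : List String) (i : Int) :
    pvProcA 0 ls = (match pvIdxs i ls with
      | [] => ls
      | c :: _ => ls.take (c - i).toNat ++ (ls.drop (c - i).toNat).filter pvKeep) := by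
  induction ls generalizing i with
  | nil => simp [pvIdxs_nil, pvProcA]
  | cons l ls ih =>
    rw [pvIdxs_cons]
    by_cases h1 : pvHdr l
    · simp only [h1, if_true]
      unfold pvProcA
      simp [h1, pvProcA_pos ls 1 (by omega), pvKeep, pvHdr_not_dev l h1]
    · simp only [h1, Bool.false_eq_true, if_false]
      unfold pvProcA
      simp only [h1, Bool.false_eq_true, if_false, Bool.and_eq_true]
      rcases hx : pvIdxs (i+1) ls with _ | ⟨c, rest⟩
      · have := ih (i+1)
        rw [hx] at this
        simp [this]
      · have hc : i + 1 ≤ c := pvIdxs_ge (i+1) ls c (by rw [hx]; exact List.mem_cons_self ..)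
        have h2 : (c - i).toNat = (c - (i+1)).toNat + 1 := by omega
        have := ih (i+1)
        rw [hx] at this
        simp [this, h2]

theorem pvProcA_neg1 (ls : List String) (i : Int) :
    pvProcA (-1) ls = (match pvIdxs i ls with
      | [] => ls
      | [_] => ls
      | _ :: c :: _ => ls.take (c - i).toNat ++ (ls.drop (c - i).toNat).filter pvKeep) := by
  induction ls generalizing i with
  | nil => simp [pvIdxs_nil, pvProcA]
  | cons l ls ih =>
    rw [pvIdxs_cons]
    by_cases h1 : pvHdr l
    · simp only [h1, if_true]
      unfold pvProcA
      simp only [h1, if_true]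
      rcases hx : pvIdxs (i+1) ls with _ | ⟨c, rest⟩
      · have := pvProcA_zero ls (i+1)
        rw [hx] at this
        simp [this]
      · have hc : i + 1 ≤ c := pvIdxs_ge (i+1) ls c (by rw [hx]; exact List.mem_cons_self ..)
        have h2 : (c - i).toNat = (c - (i+1)).toNat + 1 := by omega
        have := pvProcA_zero ls (i+1)
        rw [hx] at this
        simp [this, h2]
    · simp only [h1, Bool.false_eq_true, if_false]
      unfold pvProcA
      simp only [h1, Bool.false_eq_true, if_false, Bool.and_eq_true]
      rcases hx : pvIdxs (i+1) ls with _ | ⟨c0, _ | ⟨c, rest⟩⟩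
      · have := ih (i+1); rw [hx] at this; simp [this]
      · have := ih (i+1); rw [hx] at this; simp [this]
      · have hc : i + 1 ≤ c := by
          have := pvIdxs_ge (i+1) ls c (by rw [hx]; exact List.mem_cons_of_mem _ (List.mem_cons_self ..))
          omega
        have h2 : (c - i).toNat = (c - (i+1)).toNat + 1 := by omega
        have := ih (i+1); rw [hx] at this
        simp [this, h2]

-- ===== VERDICT (by name: the statement is the Claim_ definition above) =====
theorem deduplicate_device_metrics_py_spec : Claim_equal_deduplicate_device_metrics_py := by
  intro raw _
  unfold Spec_deduplicate_device_metrics_py deduplicate_device_metrics_py deduplicate_device_metrics_py_alt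
  rw [pvFoldA]
  set lines := (PySem.Str.split? raw "\n").getD [] with hlines
  have hhdr : ((PySem.List.enumerate lines 0).filter
      (fun p => PySem.Str.startswith (PySem.Str.lstrip p.2) "Metric Name")).map (·.1)
      = pvIdxs 0 lines := by
    unfold pvIdxs pvHdr; rfl
  simp only [hhdr, List.nil_append]
  congr 1
  rw [pvProcA_neg1 lines 0]
  rcases hx : pvIdxs 0 lines with _ | ⟨c0, _ | ⟨c, rest⟩⟩
  · simp
  · simp
  · have hc : (0 : Int) ≤ c := pvIdxs_ge 0 lines c (by rw [hx]; exact List.mem_cons_of_mem _ (List.mem_cons_self ..))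
    rw [if_neg (by simp)]
    rw [PySem.List.slice_to _ (by simpa using hc), PySem.List.slice_from _ (by simpa using hc)]
    simp only [Int.sub_zero, List.getElem!_cons_succ, List.getElem!_cons_zero]
    unfold pvKeep pvDev
    rfl
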